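-- pv_equiv track=rewrite | github.com/sar9ho/usd-truthcheck | core/fix_author.py | _over_block
-- ===== SOURCE A (Python) =====
-- from typing import List, Dict, Any
--
-- def _over_block(path: str, lines: List[str]) -> str:
--     # path like /World/Geom/Floor -> def "World"{ over "Geom"{ over "Floor"{ ... }}}
--     parts = [p for p in path.split("/") if p]
--     out = []
--     # open chain
--     for i, p in enumerate(parts):
--         kw = "def" if i == 0 else "over"
--         out.append(f'{kw} "{p}" ' + "{")
--     # payload
--     out += lines
--     # close chain
--     out += ["}" for _ in parts]
--     return "\n".join(out)
-- ===== SOURCE B (Python) =====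
-- from typing import List
--
-- def _over_block(path: str, lines: List[str]) -> str:
--     # Recursive inside-out assembly: each path segment wraps the rest in kw "name" { ... }
--     parts = [p for p in path.split("/") if p]
--
--     def build(rest: List[str], first: bool) -> List[str]:
--         if not rest:
--             return lines
--         kw = "def" if first else "over"
--         return [f'{kw} "{rest[0]}" ' + "{"] + build(rest[1:], False) + ["}"]
--
--     return "\n".join(build(parts, True))
-- ===== Notes on version B (the rewrite author's own statement) =====
-- stated objective: alternative
-- what changed: Replaces the three sequential passes (open-chain loop, payload append, close-chain comprehension) by a single recursive helper that assembles the nested block inside-out over the path segments.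
import Mathlib
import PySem

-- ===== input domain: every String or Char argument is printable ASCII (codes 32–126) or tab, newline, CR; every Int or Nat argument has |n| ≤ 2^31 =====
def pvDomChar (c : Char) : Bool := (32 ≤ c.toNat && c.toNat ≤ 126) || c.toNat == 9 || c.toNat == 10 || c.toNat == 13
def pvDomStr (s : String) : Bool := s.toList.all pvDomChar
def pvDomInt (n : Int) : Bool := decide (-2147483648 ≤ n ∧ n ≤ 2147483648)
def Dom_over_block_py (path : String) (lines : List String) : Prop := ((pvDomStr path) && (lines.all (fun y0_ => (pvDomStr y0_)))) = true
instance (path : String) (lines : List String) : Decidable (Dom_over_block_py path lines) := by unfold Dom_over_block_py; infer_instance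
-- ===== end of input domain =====

-- ===== PORT A =====
-- A: three passes — open-chain loop over enumerate(parts), payload append, close-brace list — then join.
-- B replaces them by one recursive inside-out assembly; return values proved equal on all inputs.
def over_block_py (path : String) (lines : List String) : String :=
  let parts := ((PySem.Str.split? path "/").getD []).filter (fun p => p != "")
  let out := (PySem.List.enumerate parts).foldl
      (fun acc pi =>
        acc ++ [PySem.Str.join "" [(if pi.1 == 0 then "def" else "over"), " \"", pi.2, "\" ", "{"]])
      ([] : List String)
  let out := out ++ lines
  let out := out ++ parts.map (fun _ => "}")
  PySem.Str.join "\n" out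

-- ===== PORT B =====
-- build(rest, first): payload when rest is empty, else wrap build of the tail in kw "head" { … }
def overBlockAltBuild (lines : List String) : List String → Bool → List String
  | [], _ => lines
  | p :: ps, first =>
    (PySem.Str.join "" [(if first then "def" else "over"), " \"", p, "\" ", "{"])
      :: (overBlockAltBuild lines ps false ++ ["}"])

def over_block_py_alt (path : String) (lines : List String) : String :=
  let parts := ((PySem.Str.split? path "/").getD []).filter (fun p => p != "")
  PySem.Str.join "\n" (overBlockAltBuild lines parts true)

-- ===== PRECONDITION & SPEC =====
def Spec_over_block_py (path : String) (lines : List String) (out : String) : Prop := out = over_block_py_alt path lines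
instance (path : String) (lines : List String) (out : String) : Decidable (Spec_over_block_py path lines out) := by unfold Spec_over_block_py; infer_instance

-- ===== CLAIM (what is proved, stated in full; the proofs are below) =====
def Claim_equal_over_block_py : Prop := ∀ (path : String) (lines : List String), Dom_over_block_py path lines → Spec_over_block_py path lines (over_block_py path lines)

-- ===== LEMMAS AND PROOFS =====

def overBlockLine (pi : Int × String) : String :=
  PySem.Str.join "" [(if pi.1 == 0 then "def" else "over"), " \"", pi.2, "\" ", "{"]

theorem foldl_append_map {α β : Type} (f : α → β) :
    ∀ (l : List α) (acc : List β),
      l.foldl (fun acc x => acc ++ [f x]) acc = acc ++ l.map f := by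
  intro l
  induction l with
  | nil => intro acc; simp
  | cons x xs ih => intro acc; simp [List.foldl, ih]

theorem rep_shift (n : Nat) :
    List.replicate n "}" ++ ["}"] = "}" :: List.replicate n "}" := by
  induction n with
  | zero => rfl
  | succ n ih => simp [List.replicate_succ, ih]

theorem altBuild_eq (lines : List String) :
    ∀ (ps : List String) (s : Int) (first : Bool), 0 ≤ s → first = decide (s = 0) →
      overBlockAltBuild lines ps first =
        (PySem.List.enumerate ps s).map overBlockLine ++ lines ++ List.replicate ps.length "}" := by
  intro ps
  induction ps with
  | nil => intro s first _ _; simp [overBlockAltBuild]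
  | cons p ps ih =>
    intro s first hs hf
    have hnz : ¬ (s + 1 = 0) := by omega
    rw [overBlockAltBuild, ih (s + 1) false (by omega) (by simp [hnz])]
    simp [PySem.List.enumerate_cons, overBlockLine, List.replicate_succ, ← rep_shift, hf]

theorem over_block_eq (path : String) (lines : List String) :
    over_block_py path lines = over_block_py_alt path lines := by
  unfold over_block_py over_block_py_alt
  simp only [foldl_append_map
        (fun pi : Int × String =>
          PySem.Str.join "" [(if pi.1 == 0 then "def" else "over"), " \"", pi.2, "\" ", "{"]),
      altBuild_eq lines _ 0 true (le_refl 0) (by simp),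
      List.map_const', List.nil_append, List.append_assoc]
  rfl

-- ===== VERDICT (by name: the statement is the Claim_ definition above) =====
theorem over_block_py_spec : Claim_equal_over_block_py := by
  intro path lines _
  unfold Spec_over_block_py
  exact over_block_eq path lines
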